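-- pv_equiv track=rewrite | github.com/jacquelinetruong/CP468-BNART | ctcu.py | get_node_indices
-- ===== SOURCE A (Python) =====
-- def get_node_indices(coordinates, road_map):
--     node_indices = []
--     for (x, y) in coordinates:
--         for i, row in enumerate(road_map):
--             for j, (coord_x, coord_y) in enumerate(row):
--                 if (x, y) == (coord_x, coord_y):
--                     node_indices.append(i * len(row) + j)
--     return node_indices
-- ===== SOURCE B (Python) =====
-- def get_node_indices(coordinates, road_map):
--     # Build coord -> row-major indices once, then one lookup per coordinate.
--     index = {}
--     for i, row in enumerate(road_map):
--         w = len(row)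
--         for j, c in enumerate(row):
--             index.setdefault(c, []).append(i * w + j)
--     out = []
--     for c in coordinates:
--         out.extend(index.get(c, []))
--     return out
-- ===== Notes on version B (the rewrite author's own statement) =====
-- stated objective: faster
-- what changed: Instead of rescanning the whole grid for every coordinate, B builds a dict from coordinate to its row-major indices in one pass over the map and then just looks up each query coordinate.
import Mathlib
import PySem

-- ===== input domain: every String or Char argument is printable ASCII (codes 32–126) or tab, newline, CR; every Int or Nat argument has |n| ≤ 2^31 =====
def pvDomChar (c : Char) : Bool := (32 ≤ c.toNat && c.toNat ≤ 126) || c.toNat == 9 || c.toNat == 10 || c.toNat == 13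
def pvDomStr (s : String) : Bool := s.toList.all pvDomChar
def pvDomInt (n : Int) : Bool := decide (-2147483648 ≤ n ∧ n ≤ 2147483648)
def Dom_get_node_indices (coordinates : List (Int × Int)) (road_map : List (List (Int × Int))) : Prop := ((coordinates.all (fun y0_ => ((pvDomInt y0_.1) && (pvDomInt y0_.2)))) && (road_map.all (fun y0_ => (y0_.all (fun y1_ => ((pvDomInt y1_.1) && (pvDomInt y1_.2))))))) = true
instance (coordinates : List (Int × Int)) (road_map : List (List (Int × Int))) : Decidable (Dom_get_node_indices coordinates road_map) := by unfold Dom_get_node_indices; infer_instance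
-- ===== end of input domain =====

-- B replaces A's full rescan of the grid per query coordinate by a dict built once (asymptotically faster).

-- ===== PORT A =====
def get_node_indices (coordinates : List (Int × Int)) (road_map : List (List (Int × Int))) : List Int :=
  coordinates.foldl (fun acc xy =>
    (PySem.List.enumerate road_map).foldl (fun acc ir =>
      (PySem.List.enumerate ir.2).foldl (fun acc jc =>
        if xy = jc.2 then acc ++ [ir.1 * (ir.2.length : Int) + jc.1] else acc) acc) acc) []

-- ===== PORT B =====
def get_node_indices_alt (coordinates : List (Int × Int)) (road_map : List (List (Int × Int))) : List Int :=
  let index : PySem.Dict (Int × Int) (List Int) :=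
    (PySem.List.enumerate road_map).foldl (fun d ir =>
      let w : Int := ir.2.length
      (PySem.List.enumerate ir.2).foldl (fun d jc =>
        d.insert jc.2 (d.getD jc.2 [] ++ [ir.1 * w + jc.1])) d) PySem.Dict.empty
  coordinates.foldl (fun out c => out ++ index.getD c []) []

-- ===== PRECONDITION & SPEC =====
def Spec_get_node_indices (coordinates : List (Int × Int)) (road_map : List (List (Int × Int))) (out : List Int) : Prop := out = get_node_indices_alt coordinates road_map
instance (coordinates : List (Int × Int)) (road_map : List (List (Int × Int))) (out : List Int) : Decidable (Spec_get_node_indices coordinates road_map out) := by unfold Spec_get_node_indices; infer_instance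

-- ===== CLAIM (what is proved, stated in full; the proofs are below) =====
def Claim_equal_get_node_indices : Prop := ∀ (coordinates : List (Int × Int)) (road_map : List (List (Int × Int))), Dom_get_node_indices coordinates road_map → Spec_get_node_indices coordinates road_map (get_node_indices coordinates road_map)

-- ===== LEMMAS AND PROOFS =====

/-- The flat list of (coordinate, row-major index) entries, in scan order. -/
def gniEntries (road_map : List (List (Int × Int))) : List ((Int × Int) × Int) :=
  (PySem.List.enumerate road_map).flatMap (fun ir =>
    (PySem.List.enumerate ir.2).map (fun jc => (jc.2, ir.1 * (ir.2.length : Int) + jc.1)))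

/-- The dict-building step of B. -/
def gniStep (d : PySem.Dict (Int × Int) (List Int)) (e : (Int × Int) × Int) :
    PySem.Dict (Int × Int) (List Int) :=
  d.insert e.1 (d.getD e.1 [] ++ [e.2])

theorem gniStep_getD (L : List ((Int × Int) × Int)) (d : PySem.Dict (Int × Int) (List Int))
    (c : Int × Int) :
    (L.foldl gniStep d).getD c [] =
      d.getD c [] ++ (L.filter (fun e => decide (e.1 = c))).map (·.2) := by
  induction L generalizing d with
  | nil => simp
  | cons e L ih =>
    simp only [List.foldl_cons, ih, List.filter_cons]
    by_cases h : e.1 = c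
    · subst h
      simp [gniStep, PySem.Dict.getD_insert_self]
    · simp [gniStep, PySem.Dict.getD_insert, h, Ne.symm h]

/-- B's dict, reached at key `c`, yields exactly the scan-order matches for `c`. -/
theorem gni_index_getD (road_map : List (List (Int × Int))) (c : Int × Int) :
    ((PySem.List.enumerate road_map).foldl (fun d ir =>
        let w : Int := ir.2.length
        (PySem.List.enumerate ir.2).foldl (fun d jc =>
          d.insert jc.2 (d.getD jc.2 [] ++ [ir.1 * w + jc.1])) d)
        (PySem.Dict.empty : PySem.Dict (Int × Int) (List Int))).getD c [] =
      ((gniEntries road_map).filter (fun e => decide (e.1 = c))).map (·.2) := by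
  have h1 : ∀ (L : List (Int × List (Int × Int))) (d : PySem.Dict (Int × Int) (List Int)),
      L.foldl (fun d ir =>
        let w : Int := ir.2.length
        (PySem.List.enumerate ir.2).foldl (fun d jc =>
          d.insert jc.2 (d.getD jc.2 [] ++ [ir.1 * w + jc.1])) d) d
      = (L.flatMap (fun ir => (PySem.List.enumerate ir.2).map
          (fun jc => (jc.2, ir.1 * (ir.2.length : Int) + jc.1)))).foldl gniStep d := by
    intro L
    induction L with
    | nil => intro d; rfl
    | cons ir L ih =>
      intro d
      simp only [List.foldl_cons, List.flatMap_cons, List.foldl_append, ih, List.foldl_map]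
      rfl
  rw [h1, gniEntries]
  rw [gniStep_getD]
  simp

/-- A's inner double loop appends exactly the scan-order matches for `xy`. -/
theorem gni_inner (road_map : List (List (Int × Int))) (xy : Int × Int) (acc : List Int) :
    (PySem.List.enumerate road_map).foldl (fun acc ir =>
      (PySem.List.enumerate ir.2).foldl (fun acc jc =>
        if xy = jc.2 then acc ++ [ir.1 * (ir.2.length : Int) + jc.1] else acc) acc) acc =
    acc ++ ((gniEntries road_map).filter (fun e => decide (e.1 = xy))).map (·.2) := by
  simp only [PySem.List.foldl_append_ite (p := fun jc : Int × (Int × Int) => xy = jc.2)]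
  rw [PySem.List.foldl_append_eq_flatMap]
  congr 1
  rw [gniEntries]
  induction PySem.List.enumerate road_map with
  | nil => rfl
  | cons ir L ih =>
    simp only [List.flatMap_cons, List.filter_append, List.map_append, ih,
      List.filter_map, List.map_map]
    congr 2
    apply List.filter_congr; intro jc _
    simp [Function.comp, eq_comm]

-- ===== VERDICT (by name: the statement is the Claim_ definition above) =====
theorem get_node_indices_spec : Claim_equal_get_node_indices := by
  intro coordinates road_map _
  unfold Spec_get_node_indices get_node_indices get_node_indices_alt
  simp only [gni_index_getD, gni_inner]
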